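-- pv_equiv track=rewrite | github.com/ArchipelagoMW/Archipelago | worlds/tunic/combat_logic.py | calc_def_sp_cost
-- ===== SOURCE A (Python) =====
-- def calc_def_sp_cost(def_upgrades: int, sp_upgrades: int) -> int:
--     money = 0
--
--     money_per_def = 100
--     for _ in range(def_upgrades):
--         money += money_per_def
--         money_per_def += 50
--
--     money_per_sp = 200
--     for _ in range(sp_upgrades):
--         money += money_per_sp
--         money_per_sp += 200
--
--     return money
-- ===== SOURCE B (Python) =====
-- def calc_def_sp_cost(def_upgrades: int, sp_upgrades: int) -> int:
--     d = max(def_upgrades, 0)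
--     s = max(sp_upgrades, 0)
--     # defense: 100, 150, 200, ... -> 100d + 50*d(d-1)/2 ; sp: 200, 400, ... -> 200*s(s+1)/2
--     return 100 * d + 25 * d * (d - 1) + 100 * s * (s + 1)
-- ===== Notes on version B (the rewrite author's own statement) =====
-- stated objective: faster
-- what changed: Replaced the two accumulation loops over range(def_upgrades)/range(sp_upgrades) with closed-form arithmetic-series formulas.
import Mathlib
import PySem

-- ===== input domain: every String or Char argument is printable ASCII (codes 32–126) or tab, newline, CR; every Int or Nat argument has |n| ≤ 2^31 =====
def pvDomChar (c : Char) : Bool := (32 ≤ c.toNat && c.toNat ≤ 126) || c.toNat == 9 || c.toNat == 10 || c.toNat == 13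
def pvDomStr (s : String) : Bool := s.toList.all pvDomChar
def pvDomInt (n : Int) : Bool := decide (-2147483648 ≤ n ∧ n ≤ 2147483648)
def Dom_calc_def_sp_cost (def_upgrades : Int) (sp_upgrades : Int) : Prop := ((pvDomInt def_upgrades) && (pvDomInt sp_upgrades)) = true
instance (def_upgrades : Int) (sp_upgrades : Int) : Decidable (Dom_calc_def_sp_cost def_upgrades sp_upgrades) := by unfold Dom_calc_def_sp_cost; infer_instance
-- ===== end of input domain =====

-- B replaces A's two accumulation loops with closed-form arithmetic-series formulas (O(1) instead of O(def+sp)).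

-- ===== PORT A =====
-- 'for _ in range(n)' iterates n.toNat times; state = (money, money_per_*), exactly A's loop bodies.
def calc_def_sp_cost (def_upgrades : Int) (sp_upgrades : Int) : Int :=
  let s1 := (List.range def_upgrades.toNat).foldl
    (fun (st : Int × Int) _ => (st.1 + st.2, st.2 + 50)) (0, 100)
  let s2 := (List.range sp_upgrades.toNat).foldl
    (fun (st : Int × Int) _ => (st.1 + st.2, st.2 + 200)) (s1.1, 200)
  s2.1

-- ===== PORT B =====
def calc_def_sp_cost_alt (def_upgrades : Int) (sp_upgrades : Int) : Int :=
  let d := max def_upgrades 0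
  let s := max sp_upgrades 0
  100 * d + 25 * d * (d - 1) + 100 * s * (s + 1)

-- ===== PRECONDITION & SPEC =====
def Spec_calc_def_sp_cost (def_upgrades : Int) (sp_upgrades : Int) (out : Int) : Prop := out = calc_def_sp_cost_alt def_upgrades sp_upgrades
instance (def_upgrades : Int) (sp_upgrades : Int) (out : Int) : Decidable (Spec_calc_def_sp_cost def_upgrades sp_upgrades out) := by unfold Spec_calc_def_sp_cost; infer_instance

-- ===== CLAIM (what is proved, stated in full; the proofs are below) =====
def Claim_equal_calc_def_sp_cost : Prop := ∀ (def_upgrades : Int) (sp_upgrades : Int), Dom_calc_def_sp_cost def_upgrades sp_upgrades → Spec_calc_def_sp_cost def_upgrades sp_upgrades (calc_def_sp_cost def_upgrades sp_upgrades)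

-- ===== LEMMAS AND PROOFS =====

theorem def_loop_closed (n : Nat) (m p : Int) :
    (List.range n).foldl (fun (st : Int × Int) _ => (st.1 + st.2, st.2 + 50)) (m, p)
      = (m + n * p + 25 * n * (n - 1), p + 50 * n) := by
  induction n generalizing m p with
  | zero => simp
  | succ k ih =>
    rw [List.range_succ, List.foldl_append, ih]
    simp only [List.foldl_cons, List.foldl_nil]
    simp only [Prod.mk.injEq]
    constructor <;> (push_cast; ring)

theorem sp_loop_closed (n : Nat) (m p : Int) :
    (List.range n).foldl (fun (st : Int × Int) _ => (st.1 + st.2, st.2 + 200)) (m, p)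
      = (m + n * p + 100 * n * (n - 1), p + 200 * n) := by
  induction n generalizing m p with
  | zero => simp
  | succ k ih =>
    rw [List.range_succ, List.foldl_append, ih]
    simp only [List.foldl_cons, List.foldl_nil]
    simp only [Prod.mk.injEq]
    constructor <;> (push_cast; ring)

-- ===== VERDICT (by name: the statement is the Claim_ definition above) =====
theorem calc_def_sp_cost_spec : Claim_equal_calc_def_sp_cost := by
  intro d s _
  unfold Spec_calc_def_sp_cost calc_def_sp_cost calc_def_sp_cost_alt
  simp only [def_loop_closed, sp_loop_closed]
  have hd : ((d.toNat : Int)) = max d 0 := Int.toNat_eq_max d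
  have hs : ((s.toNat : Int)) = max s 0 := Int.toNat_eq_max s
  rw [hd, hs]
  ring
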